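-- pv_equiv track=rewrite | github.com/yonysek/B3B33ALP | Homeworks/10/nurikabenvm2.py | islandsFromBoard
-- ===== SOURCE A (Python) =====
-- def islandsFromBoard(board):
--     islands = {}
--
--     for i in range(len(board)):
--         for j in range(len(board)):
--             el = board[i][j]
--             if el not in [-1, 0]:
--                 if el not in islands:
--                     islands[el] = [(i, j)]
--                 else:
--                     islands[el].append((i, j))
--
--     return islands
-- ===== SOURCE B (Python) =====
-- def islandsFromBoard(board):
--     # Two-phase re-implementation: flatten the n x n board into (value, coord)
--     # pairs once, record island values in first-occurrence (row-major) order,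
--     # then assemble each island's coordinate list with a per-value scan.
--     n = len(board)
--     cells = [(board[i][j], (i, j)) for i in range(n) for j in range(n)]
--     order = []
--     for el, _ in cells:
--         if el not in (-1, 0) and el not in order:
--             order.append(el)
--     return {el: [c for v, c in cells if v == el] for el in order}
-- ===== Notes on version B (the rewrite author's own statement) =====
-- stated objective: alternative
-- what changed: Instead of A's single pass that mutates a dict cell by cell, B flattens the board into a (value, coordinate) list, collects the island values in first-occurrence order, and builds each island's coordinate list by a per-value scan of the flat list.
import Mathlib
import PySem

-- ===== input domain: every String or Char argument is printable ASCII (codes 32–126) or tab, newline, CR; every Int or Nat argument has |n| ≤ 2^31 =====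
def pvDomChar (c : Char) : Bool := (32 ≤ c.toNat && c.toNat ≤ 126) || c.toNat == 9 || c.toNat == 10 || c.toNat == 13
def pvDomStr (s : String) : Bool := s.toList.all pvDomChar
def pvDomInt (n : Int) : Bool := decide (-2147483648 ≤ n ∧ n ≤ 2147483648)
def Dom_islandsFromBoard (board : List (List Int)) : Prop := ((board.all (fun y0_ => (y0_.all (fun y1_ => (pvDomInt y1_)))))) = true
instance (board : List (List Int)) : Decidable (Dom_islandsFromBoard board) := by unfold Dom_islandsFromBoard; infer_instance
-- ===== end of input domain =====

-- B replaces A's incremental dict mutation by a flatten / first-occurrence-key / per-key-collect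
-- decomposition (alternative algorithm, same results including key order).

-- ===== PORT A =====
def islandsFromBoard (board : List (List Int)) : List (Int × List (Int × Int)) :=
  ((PySem.List.pyRange 0 board.length 1).foldl (fun d i =>
    (PySem.List.pyRange 0 board.length 1).foldl (fun d j =>
      match PySem.List.pyGet? board i with
      | none => d   -- Python raises IndexError here; excluded by Pre_
      | some row =>
        match PySem.List.pyGet? row j with
        | none => d   -- Python raises IndexError here; excluded by Pre_
        | some el =>
          if el = -1 ∨ el = 0 then d
          else if d.contains el = false then d.insert el [(i, j)]
          else d.modify el [] (· ++ [(i, j)])) d) PySem.Dict.empty).items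

-- ===== PORT B =====
def islandsFromBoard_alt (board : List (List Int)) : List (Int × List (Int × Int)) :=
  let n := board.length
  let cells : List (Int × (Int × Int)) :=
    (PySem.List.pyRange 0 n 1).flatMap (fun i =>
      (PySem.List.pyRange 0 n 1).filterMap (fun j =>
        match PySem.List.pyGet? board i with
        | none => none   -- Python raises IndexError here; excluded by Pre_
        | some row =>
          match PySem.List.pyGet? row j with
          | none => none   -- Python raises IndexError here; excluded by Pre_
          | some el => some (el, (i, j))))
  let order : List Int := cells.foldl (fun order p =>
    if ¬(p.1 = -1 ∨ p.1 = 0) ∧ p.1 ∉ order then order ++ [p.1] else order) []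
  (PySem.Dict.ofList (order.map (fun el =>
    (el, (cells.filter (fun p => decide (p.1 = el))).map (·.2))))).items

-- ===== PRECONDITION & SPEC =====
-- Pre_ excludes exactly the ragged boards on which A raises IndexError (a row shorter than
-- the number of rows); on such boards Python A (and B) raise, so nothing is claimed there.
def Pre_islandsFromBoard (board : List (List Int)) : Prop :=
  (board.all (fun row => board.length ≤ row.length)) = true
instance (board : List (List Int)) : Decidable (Pre_islandsFromBoard board) := by
  unfold Pre_islandsFromBoard; infer_instance
def pvWitness_islandsFromBoard : List (List Int) := [[1, 0], [-1, 1]]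
def Spec_islandsFromBoard (board : List (List Int)) (out : List (Int × List (Int × Int))) : Prop := out = islandsFromBoard_alt board
instance (board : List (List Int)) (out : List (Int × List (Int × Int))) : Decidable (Spec_islandsFromBoard board out) := by unfold Spec_islandsFromBoard; infer_instance

-- ===== CLAIM (what is proved, stated in full; the proofs are below) =====
def Claim_equal_islandsFromBoard : Prop := ∀ (board : List (List Int)), Dom_islandsFromBoard board → Pre_islandsFromBoard board → Spec_islandsFromBoard board (islandsFromBoard board)

-- ===== LEMMAS AND PROOFS =====

-- the flat row-major (value, coordinate) cell list B builds (and A effectively traverses)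
def pvCells (board : List (List Int)) : List (Int × (Int × Int)) :=
  (PySem.List.pyRange 0 board.length 1).flatMap (fun i =>
    (PySem.List.pyRange 0 board.length 1).filterMap (fun j =>
      match PySem.List.pyGet? board i with
      | none => none
      | some row =>
        match PySem.List.pyGet? row j with
        | none => none
        | some el => some (el, (i, j))))

-- the Bool form of "el not in [-1, 0]"
def pvKeep (p : Int × (Int × Int)) : Bool := !(p.1 == -1 || p.1 == 0)

theorem pv_foldl_filterMap {α β γ : Type} (l : List α) (f : α → Option β)
    (g : γ → β → γ) (init : γ) :
    (l.filterMap f).foldl g init = l.foldl (fun acc x => (f x).elim acc (g acc)) init := by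
  induction l generalizing init with
  | nil => rfl
  | cons x t ih =>
    cases h : f x <;> simp [h, ih]

-- a fold that skips the -1/0 cells is a fold over the pvKeep-filtered list
theorem pv_guard_filter {δ : Type} (l : List (Int × (Int × Int)))
    (f : δ → (Int × (Int × Int)) → δ) (init : δ) :
    l.foldl (fun acc x => if x.1 = -1 ∨ x.1 = 0 then acc else f acc x) init =
      (l.filter pvKeep).foldl f init := by
  induction l generalizing init with
  | nil => rfl
  | cons x t ih =>
    rw [List.foldl_cons, List.filter_cons]
    by_cases hg : x.1 = -1 ∨ x.1 = 0
    · have hk : pvKeep x = false := by rcases hg with h | h <;> simp [pvKeep, h]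
      rw [if_pos hg, hk]
      exact ih init
    · have hk : pvKeep x = true := by
        push Not at hg
        simp [pvKeep, hg.1, hg.2]
      rw [if_neg hg, hk]
      simp only [if_pos, List.foldl_cons]
      exact ih (f init x)

theorem pv_filter_filter_of_imp {α : Type} (l : List α) (r q : α → Bool)
    (h : ∀ x, r x = true → q x = true) :
    (l.filter q).filter r = l.filter r := by
  rw [List.filter_filter]
  apply List.filter_congr
  intro x _
  cases hr : r x
  · simp
  · simp [h x hr]

-- B is (definitionally) the ofList/map expression over pvCells
theorem pv_B_eq (board : List (List Int)) :
    islandsFromBoard_alt board =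
      (PySem.Dict.ofList (((pvCells board).foldl (fun order p =>
          if ¬(p.1 = -1 ∨ p.1 = 0) ∧ p.1 ∉ order then order ++ [p.1] else order) []).map
        (fun el => (el, ((pvCells board).filter (fun p => decide (p.1 = el))).map (·.2))))).items := rfl

-- A's nested loops are the modify-fold over the flat pvKeep-filtered cell list
theorem pv_A_eq (board : List (List Int)) :
    islandsFromBoard board =
      (((pvCells board).filter pvKeep).foldl
        (fun d p => d.modify p.1 [] (· ++ [p.2])) PySem.Dict.empty).items := by
  rw [← pv_guard_filter]
  unfold islandsFromBoard pvCells
  rw [List.foldl_flatMap]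
  congr 1
  apply PySem.List.foldl_congr_mem
  intro d i _
  rw [pv_foldl_filterMap]
  apply PySem.List.foldl_congr_mem
  intro d' j _
  cases h1 : PySem.List.pyGet? board i with
  | none => simp
  | some row =>
    cases h2 : PySem.List.pyGet? row j with
    | none => simp [h2]
    | some el =>
      by_cases hg : el = -1 ∨ el = 0
      · simp [h2, hg]
      · by_cases hc : d'.contains el = false
        · simp [h2, hg, hc, PySem.Dict.modify, PySem.Dict.getD_of_not_contains _ [] hc]
        · simp [h2, hg, hc, PySem.Dict.modify]

-- B's first loop builds the first-occurrence key list of the pvKeep-filtered cells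
theorem pv_order_gen (cells : List (Int × (Int × Int))) (acc : List Int) :
    cells.foldl (fun order p =>
        if ¬(p.1 = -1 ∨ p.1 = 0) ∧ p.1 ∉ order then order ++ [p.1] else order) acc =
      (cells.filter pvKeep).foldl (fun o p => PySem.Set.add o p.1) acc := by
  induction cells generalizing acc with
  | nil => rfl
  | cons x t ih =>
    rw [List.foldl_cons, List.filter_cons]
    by_cases hg : x.1 = -1 ∨ x.1 = 0
    · have hk : pvKeep x = false := by rcases hg with h | h <;> simp [pvKeep, h]
      rw [if_neg (by tauto), hk]
      exact ih acc
    · have hk : pvKeep x = true := by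
        push Not at hg
        simp [pvKeep, hg.1, hg.2]
      rw [hk]
      simp only [if_pos, List.foldl_cons]
      by_cases hm : x.1 ∈ acc
      · rw [if_neg (by tauto)]
        have : PySem.Set.add acc x.1 = acc := by
          simp [PySem.Set.add, PySem.Set.contains, hm]
        rw [this]
        exact ih acc
      · rw [if_pos ⟨hg, hm⟩]
        have : PySem.Set.add acc x.1 = acc ++ [x.1] := by
          simp [PySem.Set.add, PySem.Set.contains, hm]
        rw [this]
        exact ih (acc ++ [x.1])

theorem islandsFromBoard_spec_aux (board : List (List Int)) :
    islandsFromBoard board = islandsFromBoard_alt board := by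
  rw [pv_A_eq, pv_B_eq, pv_order_gen]
  set L := pvCells board with hL
  set L' := L.filter pvKeep with hL'
  -- the order list is Set.ofList of the filtered keys
  have horder : L'.foldl (fun o p => PySem.Set.add o p.1) [] =
      PySem.Set.ofList (L'.map (·.1)) := by
    rw [PySem.Set.ofList_eq_foldl, List.foldl_map]
  rw [horder]
  -- left side: items of the modify-fold, via keys + getD
  have hnd : (L'.foldl (fun d p => d.modify p.1 [] (· ++ [p.2])) PySem.Dict.empty).keys.Nodup :=
    PySem.Dict.nodup_keys_foldl_modify_key L' (·.1) [] (fun _ p => (· ++ [p.2]))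
      PySem.Dict.empty (by simp)
  rw [PySem.Dict.items_eq_map_keys _ hnd []]
  have hkeys : (L'.foldl (fun d p => d.modify p.1 [] (· ++ [p.2])) PySem.Dict.empty).keys
      = PySem.Set.ofList (L'.map (·.1)) := by
    rw [PySem.Dict.keys_foldl_modify_key L' (·.1) [] (fun _ p => (· ++ [p.2])) PySem.Dict.empty]
    simp [PySem.Set.update_nil_left]
  rw [hkeys]
  -- right side: ofList over distinct keys returns its item list unchanged
  have hofl : ∀ w : Int → List (Int × Int),
      (PySem.Dict.ofList ((PySem.Set.ofList (L'.map (·.1))).map (fun el => (el, w el)))).items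
      = (PySem.Set.ofList (L'.map (·.1))).map (fun el => (el, w el)) := by
    intro w
    have hrfl : PySem.Dict.ofList ((PySem.Set.ofList (L'.map (·.1))).map (fun el => (el, w el)))
        = ((PySem.Set.ofList (L'.map (·.1))).map (fun el => (el, w el))).foldl
            (fun d p => d.insert p.1 p.2) PySem.Dict.empty := rfl
    rw [hrfl, List.foldl_map]
    have := PySem.Dict.items_foldl_insert_fresh (PySem.Set.ofList (L'.map (·.1)))
      (fun el => el) (fun el => w el) PySem.Dict.empty
      (by intro a _; simp) (by simpa using PySem.Set.nodup_ofList (L'.map (·.1)))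
    simpa using this
  rw [hofl]
  -- pointwise agreement over the key list
  apply List.map_congr_left
  intro k hk
  have hkg : ¬(k = -1 ∨ k = 0) := by
    rcases List.mem_map.mp ((PySem.Set.mem_ofList (L'.map (·.1)) k).mp hk) with ⟨p, hp, rfl⟩
    rw [hL'] at hp
    have := (List.mem_filter.mp hp).2
    simp [pvKeep] at this
    tauto
  have hfilters : L.filter (fun p => decide (p.1 = k)) = L'.filter (fun p => p.1 == k) := by
    rw [hL']
    have h1 : (L.filter pvKeep).filter (fun p => p.1 == k) = L.filter (fun p => p.1 == k) := by
      apply pv_filter_filter_of_imp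
      intro p hp
      have hpk : p.1 = k := by simpa using hp
      push Not at hkg
      simp [pvKeep, hpk, hkg.1, hkg.2]
    rw [h1]
    apply List.filter_congr
    intro p _
    by_cases h : p.1 = k <;> simp [h]
  have hgetD := PySem.Dict.getD_foldl_modify_append L' PySem.Dict.empty k
  simp only [PySem.Dict.getD_empty, List.nil_append] at hgetD
  rw [hgetD, hfilters]

-- ===== VERDICT (by name: the statement is the Claim_ definition above) =====
theorem islandsFromBoard_spec : Claim_equal_islandsFromBoard := by
  intro board _ _
  exact islandsFromBoard_spec_aux board
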